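-- pv_equiv track=rewrite | github.com/daniloor/tesis-mfin | process_data/process_all_ggal_data.py | find_sheets
-- ===== SOURCE A (Python) =====
-- def find_sheets(wb_sheets):
--     """Find stock and options sheet names from workbook sheets list"""
--     stock_sheet = None
--     options_sheet = None
--
--     for sheet_name in wb_sheets:
--         sheet_lower = sheet_name.lower()
--         if 'ggal' in sheet_lower and 'lote' not in sheet_lower:
--             stock_sheet = sheet_name
--         if 'lote' in sheet_lower:
--             options_sheet = sheet_name
--
--     return stock_sheet, options_sheet
-- ===== SOURCE B (Python) =====
-- def find_sheets(wb_sheets):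
--     """Find stock and options sheet names from workbook sheets list"""
--     stock_sheet = next((s for s in reversed(wb_sheets)
--                         if 'ggal' in s.lower() and 'lote' not in s.lower()), None)
--     options_sheet = next((s for s in reversed(wb_sheets)
--                           if 'lote' in s.lower()), None)
--     return stock_sheet, options_sheet
-- ===== Notes on version B (the rewrite author's own statement) =====
-- stated objective: alternative
-- what changed: Replaced the single forward loop that overwrites two accumulators with two independent backward searches (reversed + next) that each stop at the first hit, i.e. the last match.
import Mathlib
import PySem

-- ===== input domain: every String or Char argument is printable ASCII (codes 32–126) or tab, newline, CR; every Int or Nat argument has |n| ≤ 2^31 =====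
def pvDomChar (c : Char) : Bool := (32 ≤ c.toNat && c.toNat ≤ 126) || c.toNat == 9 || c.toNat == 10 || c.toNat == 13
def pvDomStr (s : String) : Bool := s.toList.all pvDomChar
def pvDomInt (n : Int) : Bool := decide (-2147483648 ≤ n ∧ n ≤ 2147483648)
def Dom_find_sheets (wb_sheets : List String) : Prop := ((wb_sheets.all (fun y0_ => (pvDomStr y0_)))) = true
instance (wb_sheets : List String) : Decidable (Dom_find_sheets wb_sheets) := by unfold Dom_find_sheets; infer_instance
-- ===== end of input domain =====

-- B replaces A's single forward loop over two accumulators by two independent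
-- backward searches (reversed + next), each returning the last matching name.
-- ===== PORT A =====
def find_sheets (wb_sheets : List String) : Option String × Option String :=
  wb_sheets.foldl
    (fun st sheet_name =>
      let sheet_lower := PySem.Str.lower sheet_name
      ( if PySem.Str.isIn "ggal" sheet_lower && !PySem.Str.isIn "lote" sheet_lower
          then some sheet_name else st.1,
        if PySem.Str.isIn "lote" sheet_lower then some sheet_name else st.2 ))
    (none, none)

-- ===== PORT B =====
def find_sheets_alt (wb_sheets : List String) : Option String × Option String :=
  let stock_sheet := wb_sheets.reverse.find?
    (fun s => PySem.Str.isIn "ggal" (PySem.Str.lower s) &&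
              !PySem.Str.isIn "lote" (PySem.Str.lower s))
  let options_sheet := wb_sheets.reverse.find?
    (fun s => PySem.Str.isIn "lote" (PySem.Str.lower s))
  (stock_sheet, options_sheet)

-- ===== PRECONDITION & SPEC =====
def Spec_find_sheets (wb_sheets : List String) (out : Option String × Option String) : Prop := out = find_sheets_alt wb_sheets
instance (wb_sheets : List String) (out : Option String × Option String) : Decidable (Spec_find_sheets wb_sheets out) := by unfold Spec_find_sheets; infer_instance

-- ===== CLAIM (what is proved, stated in full; the proofs are below) =====
def Claim_equal_find_sheets : Prop := ∀ (wb_sheets : List String), Dom_find_sheets wb_sheets → Spec_find_sheets wb_sheets (find_sheets wb_sheets)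

-- ===== LEMMAS AND PROOFS =====

-- A's last-match accumulation over a pair equals two backward first-match searches.
theorem pairfold_eq (p q : String → Bool) (xs : List String) (a b : Option String) :
    xs.foldl (fun st s => (if p s then some s else st.1, if q s then some s else st.2)) (a, b)
      = ((xs.reverse.find? p).or a, (xs.reverse.find? q).or b) := by
  induction xs generalizing a b with
  | nil => simp
  | cons x xs ih =>
      simp only [List.foldl_cons, List.reverse_cons, List.find?_append, ih]
      cases hp : xs.reverse.find? p <;> cases hq : xs.reverse.find? q <;>
        simp [Option.or] <;> split <;> simp <;> split <;> simp

-- ===== VERDICT (by name: the statement is the Claim_ definition above) =====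
theorem find_sheets_spec : Claim_equal_find_sheets := by
  intro wb _
  unfold Spec_find_sheets find_sheets find_sheets_alt
  simpa using pairfold_eq
    (fun s => PySem.Str.isIn "ggal" (PySem.Str.lower s) &&
              !PySem.Str.isIn "lote" (PySem.Str.lower s))
    (fun s => PySem.Str.isIn "lote" (PySem.Str.lower s)) wb none none
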